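-- pv_equiv track=rewrite | github.com/ehfdkdhswlgh/ADD_project | AutomaticProtocolReverseEngineering/entropy+sequencemining+clustering.py | find_common_subsequence_indices
-- ===== SOURCE A (Python) =====
-- import itertools
-- from typing import List
--
-- def find_common_subsequence_indices(packet_list: List[bytes], patterns: List[List[int]], max_distance: int) -> List[List[int]]:
--     common_subsequence_indices = []
--
--     for pattern_indices in patterns:
--         common_subsequences = []
--         for index_combination in itertools.combinations(pattern_indices, 2):
--             distance = abs(index_combination[0] - index_combination[1])
--             if distance <= max_distance:
--                 common_subsequences.append(list(index_combination))
--
--         if common_subsequences: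
--             common_subsequence_indices.append(common_subsequences)
--
--     return common_subsequence_indices
-- ===== SOURCE B (Python) =====
-- from typing import List
--
--
-- def find_common_subsequence_indices(packet_list: List[bytes], patterns: List[List[int]], max_distance: int) -> List[List[int]]:
--     result = []
--     for xs in patterns:
--         n = len(xs)
--         order = sorted(range(n), key=lambda i: xs[i])
--         pairs = []
--         lo = 0
--         for a in range(n):
--             va = xs[order[a]]
--             while lo < a and xs[order[lo]] < va - max_distance:
--                 lo += 1
--             for b in range(lo, a):
--                 i, j = order[b], order[a]
--                 if i > j:
--                     i, j = j, i
--                 pairs.append((i, j))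
--         if pairs:
--             pairs.sort(key=lambda p: p[0] * n + p[1])
--             result.append([[xs[i], xs[j]] for (i, j) in pairs])
--     return result
-- ===== Notes on version B (the rewrite author's own statement) =====
-- stated objective: alternative
-- what changed: Per pattern, instead of scanning all C(n,2) index combinations, B sorts positions by value, enumerates only the qualifying pairs with a sliding window over the sorted values, and sorts those pairs back into A's positional (lexicographic) order; it trades A's fixed quadratic scan for output-sensitive O(n log n + k log k) work, which is not faster on dense inputs where k itself is quadratic.
import Mathlib
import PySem

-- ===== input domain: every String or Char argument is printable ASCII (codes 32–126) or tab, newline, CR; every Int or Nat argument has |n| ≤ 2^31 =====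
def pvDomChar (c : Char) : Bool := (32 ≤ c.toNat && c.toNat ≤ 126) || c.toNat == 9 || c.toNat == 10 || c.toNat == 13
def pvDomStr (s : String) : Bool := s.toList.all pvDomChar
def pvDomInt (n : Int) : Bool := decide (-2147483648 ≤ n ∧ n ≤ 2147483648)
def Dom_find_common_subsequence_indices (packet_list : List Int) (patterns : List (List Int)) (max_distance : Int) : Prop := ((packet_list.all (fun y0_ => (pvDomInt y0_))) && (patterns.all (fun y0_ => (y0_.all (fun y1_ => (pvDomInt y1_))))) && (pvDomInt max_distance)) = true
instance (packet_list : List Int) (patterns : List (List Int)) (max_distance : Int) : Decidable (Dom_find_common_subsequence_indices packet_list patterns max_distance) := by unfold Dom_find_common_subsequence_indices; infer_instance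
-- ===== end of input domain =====

-- B replaces A's per-pattern scan over all index combinations by sort-by-value + sliding
-- window that enumerates only the qualifying pairs, then sorts them back into A's
-- positional (lexicographic) order; objective: alternative (a genuinely different
-- enumeration strategy; measured cost is comparable on dense inputs).

-- ===== PORT A =====
def find_common_subsequence_indices (packet_list : List Int) (patterns : List (List Int)) (max_distance : Int) : List (List (List Int)) :=
  patterns.foldl (fun common_subsequence_indices pattern_indices =>
    let common_subsequences :=
      (PySem.List.combinations pattern_indices 2).foldl
        (fun cs index_combination =>
          let distance := |PySem.List.pyGetD index_combination 0 0 - PySem.List.pyGetD index_combination 1 0|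
          if distance ≤ max_distance then cs ++ [index_combination] else cs) []
    if common_subsequences ≠ [] then common_subsequence_indices ++ [common_subsequences]
    else common_subsequence_indices) []

-- ===== PORT B =====
-- `if i > j: i, j = j, i` from Source B
def pvSwap (i j : Nat) : Nat × Nat := if i > j then (j, i) else (i, j)

-- the `while lo < a and xs[order[lo]] < va - max_distance: lo += 1` loop of Source B
-- (dthr = va - max_distance, computed once; Python recomputes the same value each test)
def pvAdvance (xs : List Int) (order : List Nat) (dthr : Int) (a : Nat) (lo : Nat) : Nat :=
  if h : lo < a ∧ PySem.List.pyGetD xs ((order.getD lo 0 : Nat) : Int) 0 < dthr then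
    pvAdvance xs order dthr a (lo + 1)
  else lo
termination_by a - lo
decreasing_by omega

-- one iteration of Source B's `for a in range(n)` loop; state = (lo, pairs)
def pvStep (xs : List Int) (order : List Nat) (max_distance : Int)
    (st : Nat × List (Nat × Nat)) (a : Nat) : Nat × List (Nat × Nat) :=
  let va := PySem.List.pyGetD xs ((order.getD a 0 : Nat) : Int) 0
  let lo := pvAdvance xs order (va - max_distance) a st.1
  (lo, (List.range' lo (a - lo)).foldl
        (fun ps b => ps ++ [pvSwap (order.getD b 0) (order.getD a 0)]) st.2)

-- per-pattern pair collection of Source B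
def pvPairs (xs : List Int) (max_distance : Int) : List (Nat × Nat) :=
  let n := xs.length
  let order := PySem.List.sorted (List.range n) (fun i => PySem.List.pyGetD xs (i : Int) 0)
  ((List.range n).foldl (pvStep xs order max_distance) (0, [])).2

def find_common_subsequence_indices_alt (packet_list : List Int) (patterns : List (List Int)) (max_distance : Int) : List (List (List Int)) :=
  patterns.foldl (fun result xs =>
    let pairs := pvPairs xs max_distance
    if pairs ≠ [] then
      result ++ [(PySem.List.sorted pairs (fun p => p.1 * xs.length + p.2)).map
        (fun p => [PySem.List.pyGetD xs (p.1 : Int) 0, PySem.List.pyGetD xs (p.2 : Int) 0])]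
    else result) []

-- ===== PRECONDITION & SPEC =====
def Spec_find_common_subsequence_indices (packet_list : List Int) (patterns : List (List Int)) (max_distance : Int) (out : List (List (List Int))) : Prop := out = find_common_subsequence_indices_alt packet_list patterns max_distance
instance (packet_list : List Int) (patterns : List (List Int)) (max_distance : Int) (out : List (List (List Int))) : Decidable (Spec_find_common_subsequence_indices packet_list patterns max_distance out) := by unfold Spec_find_common_subsequence_indices; infer_instance

-- ===== CLAIM (what is proved, stated in full; the proofs are below) =====
def Claim_equal_find_common_subsequence_indices : Prop := ∀ (packet_list : List Int) (patterns : List (List Int)) (max_distance : Int), Dom_find_common_subsequence_indices packet_list patterns max_distance → Spec_find_common_subsequence_indices packet_list patterns max_distance (find_common_subsequence_indices packet_list patterns max_distance)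

-- ===== LEMMAS AND PROOFS =====

-- value at position i (xs[i] for 0 ≤ i < len xs)
def pvV (xs : List Int) (i : Nat) : Int := xs.getD i 0

-- all index pairs (i, j), i < j < n, in lexicographic order — the order of itertools.combinations(range(n), 2)
def pvAllPairs : Nat → List (Nat × Nat)
  | 0 => []
  | n + 1 => (List.range n).map (fun j => (0, j + 1)) ++ (pvAllPairs n).map (fun p => (p.1 + 1, p.2 + 1))

-- the qualifying pairs in A's order
def pvQ (xs : List Int) (d : Int) : List (Nat × Nat) :=
  (pvAllPairs xs.length).filter (fun p => decide (|pvV xs p.1 - pvV xs p.2| ≤ d))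

-- A's per-pattern list
def pvApat (xs : List Int) (d : Int) : List (List Int) :=
  (PySem.List.combinations xs 2).foldl
    (fun cs c =>
      let distance := |PySem.List.pyGetD c 0 0 - PySem.List.pyGetD c 1 0|
      if distance ≤ d then cs ++ [c] else cs) []

theorem pvMap_getD_range (xs : List Int) : (List.range xs.length).map (fun j => xs.getD j 0) = xs := by
  induction xs with
  | nil => rfl
  | cons x xs ih =>
    simp only [List.length_cons, List.range_succ_eq_map, List.map_cons, List.map_map,
      Function.comp_def, List.getD_cons_zero, List.getD_cons_succ]
    rw [ih]

theorem pvCombinations_two (xs : List Int) :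
    PySem.List.combinations xs 2 = (pvAllPairs xs.length).map (fun p => [pvV xs p.1, pvV xs p.2]) := by
  induction xs with
  | nil => rfl
  | cons x xs ih =>
    rw [show (2 : Nat) = 1 + 1 from rfl, PySem.List.combinations_cons_succ,
      PySem.List.combinations_one, ih]
    simp only [List.length_cons, pvAllPairs, List.map_append, List.map_map, Function.comp_def,
      pvV, List.getD_cons_zero, List.getD_cons_succ]
    congr 1
    conv_lhs => rw [← pvMap_getD_range xs]
    simp only [List.map_map, Function.comp_def]

theorem pvMem_allPairs (n : Nat) (p : Nat × Nat) : p ∈ pvAllPairs n ↔ p.1 < p.2 ∧ p.2 < n := by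
  induction n generalizing p with
  | zero => simp [pvAllPairs]
  | succ n ih =>
    obtain ⟨i, j⟩ := p
    simp only [pvAllPairs, List.mem_append, List.mem_map, List.mem_range, Prod.mk.injEq, ih]
    constructor
    · rintro (⟨j', hj', h0, hj⟩ | ⟨⟨a, b⟩, ⟨hab, hbn⟩, ha, hb⟩) <;> omega
    · rintro ⟨hij, hjn⟩
      rcases Nat.eq_zero_or_pos i with hi | hi
      · exact Or.inl ⟨j - 1, by omega, by omega, by omega⟩
      · exact Or.inr ⟨(i - 1, j - 1), ⟨by omega, by omega⟩, by omega, by omega⟩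

theorem pvAllPairs_pairwise (n m : Nat) (h : m ≤ n) :
    (pvAllPairs m).Pairwise (fun p q => p.1 * n + p.2 < q.1 * n + q.2) := by
  induction m with
  | zero => simp [pvAllPairs]
  | succ m ih =>
    rw [pvAllPairs, List.pairwise_append]
    refine ⟨?_, ?_, ?_⟩
    · rw [List.pairwise_map]
      exact (List.pairwise_lt_range).imp (by intro a b h; simpa using h)
    · rw [List.pairwise_map]
      exact (ih (by omega)).imp (by
        intro a b h
        simp only
        have hb : b.1 * n ≤ (b.1 + 1) * n := by nlinarith
        nlinarith)
    · intro a ha b hb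
      simp only [List.mem_map, List.mem_range] at ha hb
      obtain ⟨j, hj, rfl⟩ := ha
      obtain ⟨q, hq, rfl⟩ := hb
      have h2 := (pvMem_allPairs m q).mp hq
      simp only
      nlinarith

theorem pvApat_eq (xs : List Int) (d : Int) :
    pvApat xs d = (pvQ xs d).map (fun p => [pvV xs p.1, pvV xs p.2]) := by
  unfold pvApat
  rw [show (fun (cs : List (List Int)) c =>
        let distance := |PySem.List.pyGetD c 0 0 - PySem.List.pyGetD c 1 0|
        if distance ≤ d then cs ++ [c] else cs)
      = (fun cs c => if decide (|PySem.List.pyGetD c 0 0 - PySem.List.pyGetD c 1 0| ≤ d) = true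
          then cs ++ [id c] else cs) from by funext cs c; simp]
  rw [PySem.List.foldl_append_if, pvCombinations_two]
  simp only [List.map_id, List.nil_append, pvQ, List.filter_map]
  congr 1

-- the canonical (slot-order) pair list produced by Source B's window loop
def pvC (xs : List Int) (order : List Nat) (d : Int) (a : Nat) : List (Nat × Nat) :=
  (List.range a).flatMap (fun t =>
    ((List.range t).filter (fun s => decide (pvV xs (order.getD t 0) - pvV xs (order.getD s 0) ≤ d))).map
      (fun s => pvSwap (order.getD s 0) (order.getD t 0)))

theorem pvGetD_bridge (xs : List Int) (i : Nat) : PySem.List.pyGetD xs (i : Int) 0 = pvV xs i := by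
  simp [pvV]

theorem pvSwap_eq (i j : Nat) : pvSwap i j = (min i j, max i j) := by
  unfold pvSwap
  split_ifs with h <;> refine Prod.ext ?_ ?_ <;> simp <;> omega

theorem pvSwap_inj (a b a' b' : Nat) (h : pvSwap a b = pvSwap a' b') :
    (a = a' ∧ b = b') ∨ (a = b' ∧ b = a') := by
  rw [pvSwap_eq, pvSwap_eq, Prod.ext_iff] at h
  simp only at h
  omega

theorem pvWindow (pr : Nat → Bool) (lo t : Nat) (hlt : lo ≤ t)
    (hlow : ∀ s, s < lo → pr s = false) (hhigh : ∀ s, lo ≤ s → s < t → pr s = true) :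
    (List.range t).filter pr = List.range' lo (t - lo) := by
  have h1 : (List.range' 0 lo).filter pr = [] := by
    rw [List.filter_eq_nil_iff]
    intro a ha
    rw [List.mem_range'] at ha
    obtain ⟨i, hi, rfl⟩ := ha
    simp [hlow _ (by omega)]
  have h2 : (List.range' lo (t - lo)).filter pr = List.range' lo (t - lo) := by
    rw [List.filter_eq_self]
    intro a ha
    rw [List.mem_range'] at ha
    obtain ⟨i, hi, rfl⟩ := ha
    exact hhigh _ (by omega) (by omega)
  calc (List.range t).filter pr
      = (List.range' 0 lo ++ List.range' lo (t - lo)).filter pr := by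
        rw [show List.range' 0 lo ++ List.range' lo (t - lo) = List.range' 0 (lo + (t - lo)) from by
          simpa using List.range'_append (s := 0) (m := lo) (n := t - lo) (step := 1)]
        rw [List.range_eq_range', show lo + (t - lo) = t from by omega]
    _ = List.range' lo (t - lo) := by rw [List.filter_append, h1, h2, List.nil_append]

theorem pvAdvance_spec (xs : List Int) (order : List Nat) (dthr : Int) (a : Nat) :
    ∀ k lo, a - lo ≤ k → lo ≤ a →
      lo ≤ pvAdvance xs order dthr a lo ∧ pvAdvance xs order dthr a lo ≤ a ∧
      (∀ b, lo ≤ b → b < pvAdvance xs order dthr a lo →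
        PySem.List.pyGetD xs ((order.getD b 0 : Nat) : Int) 0 < dthr) ∧
      (pvAdvance xs order dthr a lo < a →
        ¬ PySem.List.pyGetD xs ((order.getD (pvAdvance xs order dthr a lo) 0 : Nat) : Int) 0 < dthr) := by
  intro k
  induction k with
  | zero =>
    intro lo hk hlo
    rw [pvAdvance, dif_neg (fun hcon => absurd hcon.1 (by omega))]
    exact ⟨le_refl _, hlo, fun b h1 h2 => absurd h2 (by omega), fun h => absurd h (by omega)⟩
  | succ k ih =>
    intro lo hk hlo
    rw [pvAdvance]
    by_cases h : lo < a ∧ PySem.List.pyGetD xs ((order.getD lo 0 : Nat) : Int) 0 < dthr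
    · rw [dif_pos h]
      obtain ⟨h1, h2, h3, h4⟩ := ih (lo + 1) (by omega) (by omega)
      refine ⟨by omega, h2, ?_, h4⟩
      intro b hb1 hb2
      rcases Nat.eq_or_lt_of_le hb1 with rfl | hlt
      · exact h.2
      · exact h3 b (by omega) hb2
    · rw [dif_neg h]
      exact ⟨le_refl _, hlo, fun b h1 h2 => absurd h2 (by omega),
        fun hlt hv => h ⟨hlt, hv⟩⟩

theorem pvStep_eq (xs : List Int) (order : List Nat) (d : Int) (st : Nat × List (Nat × Nat)) (a : Nat) :
    pvStep xs order d st a =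
      (pvAdvance xs order (PySem.List.pyGetD xs ((order.getD a 0 : Nat) : Int) 0 - d) a st.1,
       st.2 ++ (List.range' (pvAdvance xs order (PySem.List.pyGetD xs ((order.getD a 0 : Nat) : Int) 0 - d) a st.1)
           (a - pvAdvance xs order (PySem.List.pyGetD xs ((order.getD a 0 : Nat) : Int) 0 - d) a st.1)).map
         (fun b => pvSwap (order.getD b 0) (order.getD a 0))) := by
  unfold pvStep
  simp only [PySem.List.foldl_append_singleton_eq_map]

theorem pvC_succ (xs : List Int) (order : List Nat) (d : Int) (a : Nat) :
    pvC xs order d (a + 1) = pvC xs order d a ++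
      ((List.range a).filter (fun s => decide (pvV xs (order.getD a 0) - pvV xs (order.getD s 0) ≤ d))).map
        (fun s => pvSwap (order.getD s 0) (order.getD a 0)) := by
  unfold pvC
  rw [List.range_succ, List.flatMap_append]
  simp

theorem pvFold_spec (xs : List Int) (order : List Nat) (d : Int)
    (hmono : ∀ p q : Nat, p ≤ q → q < xs.length →
      PySem.List.pyGetD xs ((order.getD p 0 : Nat) : Int) 0 ≤ PySem.List.pyGetD xs ((order.getD q 0 : Nat) : Int) 0) :
    ∀ a, a ≤ xs.length → ∃ lo,
      (List.range a).foldl (pvStep xs order d) (0, []) = (lo, pvC xs order d a) ∧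
      lo ≤ a ∧
      ∀ b, b < lo → ∀ t, t < xs.length → a ≤ t + 1 →
        PySem.List.pyGetD xs ((order.getD b 0 : Nat) : Int) 0 < PySem.List.pyGetD xs ((order.getD t 0 : Nat) : Int) 0 - d := by
  intro a
  induction a with
  | zero =>
    intro _
    exact ⟨0, rfl, le_refl 0, fun b hb => absurd hb (by omega)⟩
  | succ a ih =>
    intro ha
    obtain ⟨lo, heq, hle, hinv⟩ := ih (by omega)
    obtain ⟨h1, h2, h3, h4⟩ := pvAdvance_spec xs order
      (PySem.List.pyGetD xs ((order.getD a 0 : Nat) : Int) 0 - d) a (a - lo) lo (by omega) hle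
    refine ⟨pvAdvance xs order (PySem.List.pyGetD xs ((order.getD a 0 : Nat) : Int) 0 - d) a lo,
      ?_, by omega, ?_⟩
    · rw [List.range_succ, List.foldl_append, heq]
      simp only [List.foldl_cons, List.foldl_nil]
      rw [pvStep_eq]
      simp only
      refine Prod.ext rfl ?_
      simp only
      rw [pvC_succ]
      congr 1
      congr 1
      rw [pvWindow _ _ _ h2]
      · intro s hs
        rcases Nat.lt_or_ge s lo with hslo | hslo
        · have := hinv s hslo a (by omega) (by omega)
          simp only [decide_eq_false_iff_not, not_le, pvGetD_bridge] at this ⊢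
          linarith
        · have := h3 s hslo hs
          simp only [decide_eq_false_iff_not, not_le, pvGetD_bridge] at this ⊢
          linarith
      · intro s hs1 hs2
        have hlt : pvAdvance xs order (PySem.List.pyGetD xs ((order.getD a 0 : Nat) : Int) 0 - d) a lo < a := by omega
        have hexit := not_lt.mp (h4 hlt)
        have hm := hmono _ s hs1 (by omega)
        simp only [decide_eq_true_eq, pvGetD_bridge] at hexit hm ⊢
        linarith
    · intro b hb t ht hat
      have hba : PySem.List.pyGetD xs ((order.getD b 0 : Nat) : Int) 0 <
          PySem.List.pyGetD xs ((order.getD a 0 : Nat) : Int) 0 - d := by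
        rcases Nat.lt_or_ge b lo with hblo | hblo
        · exact hinv b hblo a (by omega) (by omega)
        · exact h3 b hblo hb
      have hm := hmono a t (by omega) ht
      linarith

theorem pvLoop_eq (xs : List Int) (d : Int) :
    pvPairs xs d = pvC xs (PySem.List.sorted (List.range xs.length) (fun i => PySem.List.pyGetD xs (i : Int) 0)) d xs.length := by
  unfold pvPairs
  simp only
  have hlen : (PySem.List.sorted (List.range xs.length) (fun i => PySem.List.pyGetD xs (i : Int) 0)).length = xs.length := by
    rw [PySem.List.length_sorted, List.length_range]
  have hmono : ∀ p q : Nat, p ≤ q → q < xs.length →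
      PySem.List.pyGetD xs (((PySem.List.sorted (List.range xs.length) (fun i => PySem.List.pyGetD xs (i : Int) 0)).getD p 0 : Nat) : Int) 0 ≤
      PySem.List.pyGetD xs (((PySem.List.sorted (List.range xs.length) (fun i => PySem.List.pyGetD xs (i : Int) 0)).getD q 0 : Nat) : Int) 0 := by
    intro p q hpq hq
    rw [List.getD_eq_getElem _ 0 (by omega), List.getD_eq_getElem _ 0 (by omega)]
    exact PySem.List.key_sorted_getElem_mono (List.range xs.length)
      (fun i => PySem.List.pyGetD xs (i : Int) 0) hpq (by omega)
  obtain ⟨lo, heq, -, -⟩ := pvFold_spec xs _ d hmono xs.length (le_refl _)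
  rw [heq]

theorem pvMem_Q (xs : List Int) (d : Int) (p : Nat × Nat) :
    p ∈ pvQ xs d ↔ (p.1 < p.2 ∧ p.2 < xs.length) ∧ |pvV xs p.1 - pvV xs p.2| ≤ d := by
  simp [pvQ, List.mem_filter, pvMem_allPairs]

theorem pvPerm (xs : List Int) (d : Int) :
    (pvQ xs d).Perm (pvC xs (PySem.List.sorted (List.range xs.length) (fun i => PySem.List.pyGetD xs (i : Int) 0)) d xs.length) := by
  set n := xs.length with hn
  set order := PySem.List.sorted (List.range n) (fun i => PySem.List.pyGetD xs (i : Int) 0) with horder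
  have hlen : order.length = n := by rw [horder, PySem.List.length_sorted, List.length_range]
  have hperm : order.Perm (List.range n) := PySem.List.sorted_perm _ _ _
  have hnodup : order.Nodup := hperm.nodup_iff.mpr (List.nodup_range)
  have hbound : ∀ s, s < n → order.getD s 0 < n := by
    intro s hs
    have : order.getD s 0 ∈ order := by
      rw [List.getD_eq_getElem _ 0 (by omega)]
      exact List.getElem_mem _
    have := hperm.mem_iff.mp this
    simpa using this
  have hinj : ∀ s t, s < n → t < n → order.getD s 0 = order.getD t 0 → s = t := by
    intro s t hs ht h
    rw [List.getD_eq_getElem _ 0 (by omega), List.getD_eq_getElem _ 0 (by omega)] at h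
    exact (hnodup.getElem_inj_iff).mp h
  have hsurj : ∀ i, i < n → ∃ s, s < n ∧ order.getD s 0 = i := by
    intro i hi
    have : i ∈ order := hperm.mem_iff.mpr (by simpa using hi)
    obtain ⟨s, hs, hsi⟩ := List.mem_iff_getElem.mp this
    exact ⟨s, by omega, by rw [List.getD_eq_getElem _ 0 hs]; exact hsi⟩
  have hmono : ∀ p q : Nat, p ≤ q → q < n → pvV xs (order.getD p 0) ≤ pvV xs (order.getD q 0) := by
    intro p q hpq hq
    rw [List.getD_eq_getElem _ 0 (by omega), List.getD_eq_getElem _ 0 (by omega)]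
    have := PySem.List.key_sorted_getElem_mono (List.range n)
      (fun i => PySem.List.pyGetD xs (i : Int) 0) hpq (q := q) (by rw [← horder, hlen]; exact hq)
    simp only [← horder] at this
    simpa only [pvGetD_bridge] using this
  have hQpw : (pvQ xs d).Pairwise (fun p q => p.1 * n + p.2 < q.1 * n + q.2) :=
    (pvAllPairs_pairwise n n le_rfl).filter _
  have hQnodup : (pvQ xs d).Nodup :=
    hQpw.imp (fun h heq => by rw [heq] at h; omega)
  have hCnodup : (pvC xs order d n).Nodup := by
    rw [pvC, List.nodup_flatMap]
    constructor
    · intro t ht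
      rw [List.mem_range] at ht
      apply List.Nodup.map_on
      · intro s hs s' hs' hswap
        rw [List.mem_filter, List.mem_range] at hs hs'
        rcases pvSwap_inj _ _ _ _ hswap with ⟨e1, e2⟩ | ⟨e1, e2⟩
        · exact hinj s s' (by omega) (by omega) e1
        · have := hinj s t (by omega) (by omega) e1
          omega
      · exact (List.nodup_range).filter _
    · apply List.Pairwise.imp_of_mem (l := List.range n)
        (R := fun a b => a < b) ?_ List.pairwise_lt_range
      intro t t' hmt hmt' htt
      rw [List.mem_range] at hmt hmt'
      intro x hx hx'
      rw [List.mem_map] at hx hx'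
      obtain ⟨s, hs, rfl⟩ := hx
      obtain ⟨s', hs', heqx⟩ := hx'
      rw [List.mem_filter, List.mem_range] at hs hs'
      rcases pvSwap_inj _ _ _ _ heqx.symm with ⟨e1, e2⟩ | ⟨e1, e2⟩
      · have := hinj t t' (by omega) (by omega) e2
        omega
      · have h1 := hinj s t' (by omega) (by omega) e1
        have h2 := hinj t s' (by omega) (by omega) e2
        omega
  rw [List.perm_ext_iff_of_nodup hQnodup hCnodup]
  intro p
  rw [pvMem_Q]
  rw [show (pvC xs order d n) = (List.range n).flatMap (fun t =>
    ((List.range t).filter (fun s => decide (pvV xs (order.getD t 0) - pvV xs (order.getD s 0) ≤ d))).map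
      (fun s => pvSwap (order.getD s 0) (order.getD t 0))) from rfl]
  simp only [List.mem_flatMap, List.mem_map, List.mem_filter, List.mem_range, decide_eq_true_eq]
  constructor
  · rintro ⟨⟨h12, h2n⟩, habs⟩
    obtain ⟨s, hsn, hso⟩ := hsurj p.1 (by omega)
    obtain ⟨t, htn, hto⟩ := hsurj p.2 h2n
    have hst : s ≠ t := fun e => by rw [e, hto] at hso; omega
    rcases Nat.lt_or_ge s t with hlt | hge
    · refine ⟨t, htn, s, ⟨hlt, ?_⟩, ?_⟩
      · have hm := hmono s t (by omega) htn
        rw [hso, hto] at hm ⊢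
        rw [abs_sub_comm, abs_of_nonneg (by linarith)] at habs
        linarith
      · rw [hso, hto, pvSwap_eq]
        refine (Prod.ext ?_ ?_).symm <;> dsimp only <;> omega
    · refine ⟨s, hsn, t, ⟨by omega, ?_⟩, ?_⟩
      · have hm := hmono t s (by omega) hsn
        rw [hso, hto] at hm ⊢
        rw [abs_of_nonneg (by linarith)] at habs
        linarith
      · rw [hso, hto, pvSwap_eq]
        refine (Prod.ext ?_ ?_).symm <;> dsimp only <;> omega
  · rintro ⟨t, htn, s, ⟨hst, hcond⟩, heq⟩
    have hot : order.getD t 0 < n := hbound t htn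
    have hos : order.getD s 0 < n := hbound s (by omega)
    have hne : order.getD s 0 ≠ order.getD t 0 :=
      fun e => by have := hinj s t (by omega) htn e; omega
    have hm := hmono s t (by omega) htn
    subst heq
    rw [pvSwap_eq]
    refine ⟨⟨by dsimp only; omega, by dsimp only; omega⟩, ?_⟩
    simp only
    rcases Nat.lt_or_ge (order.getD s 0) (order.getD t 0) with hlt | hge
    · rw [min_eq_left (by omega), max_eq_right (by omega)]
      rw [abs_sub_comm, abs_of_nonneg (by linarith)]
      linarith
    · rw [min_eq_right (by omega), max_eq_left (by omega)]
      rw [abs_of_nonneg (by linarith)]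
      linarith

theorem pvSorted_eq (xs : List Int) (d : Int) :
    PySem.List.sorted (pvPairs xs d) (fun p => p.1 * xs.length + p.2) = pvQ xs d := by
  apply PySem.List.sorted_eq_of_perm_of_pairwise_lt
  · rw [pvLoop_eq]
    exact pvPerm xs d
  · exact (pvAllPairs_pairwise xs.length xs.length le_rfl).filter _

theorem pvPerPattern (xs : List Int) (d : Int) :
    (pvApat xs d = (PySem.List.sorted (pvPairs xs d) (fun p => p.1 * xs.length + p.2)).map
        (fun p => [PySem.List.pyGetD xs (p.1 : Int) 0, PySem.List.pyGetD xs (p.2 : Int) 0]))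
    ∧ (pvApat xs d = [] ↔ pvPairs xs d = []) := by
  have hp : (pvQ xs d).Perm (pvPairs xs d) := by
    rw [pvLoop_eq]
    exact pvPerm xs d
  constructor
  · rw [pvSorted_eq, pvApat_eq]
    apply List.map_congr_left
    intro p _
    simp [pvV]
  · rw [pvApat_eq, List.map_eq_nil_iff]
    have hlen := hp.length_eq
    constructor
    · intro h
      rw [h] at hlen
      simp only [List.length_nil] at hlen
      exact List.eq_nil_of_length_eq_zero (by omega)
    · intro h
      rw [h] at hlen
      simp only [List.length_nil] at hlen
      exact List.eq_nil_of_length_eq_zero (by omega)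

-- ===== VERDICT (by name: the statement is the Claim_ definition above) =====
theorem find_common_subsequence_indices_spec : Claim_equal_find_common_subsequence_indices := by
  intro packet_list patterns max_distance hD
  clear hD
  unfold Spec_find_common_subsequence_indices
  unfold find_common_subsequence_indices find_common_subsequence_indices_alt
  induction patterns using List.reverseRecOn with
  | nil => rfl
  | append_singleton ps xs ih =>
      rw [List.foldl_append, List.foldl_append, ← ih]
      simp only [List.foldl]
      obtain ⟨h1, h2⟩ := pvPerPattern xs max_distance
      rw [show ((PySem.List.combinations xs 2).foldl
        (fun cs index_combination =>
          let distance := |PySem.List.pyGetD index_combination 0 0 - PySem.List.pyGetD index_combination 1 0|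
          if distance ≤ max_distance then cs ++ [index_combination] else cs) []) = pvApat xs max_distance from rfl]
      by_cases hc : pvPairs xs max_distance = []
      · rw [if_neg, if_neg]
        · simp [hc]
        · simpa [h2] using hc
      · rw [if_pos, if_pos, h1]
        · exact hc
        · simpa [h2] using hc
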